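-- pv_equiv track=rewrite | github.com/y24/TestStat-CLI | utils/DataAggregator.py | calculate_total_results
-- ===== SOURCE A (Python) =====
-- def calculate_total_results(data, no_date_data, excludes:list[str]):
--     """全日付データ合計"""
--     result = {}
--     for values in data.values():
--         for key, count in values.items():
--             result[key] = result.get(key, 0) + count
--     if "no_date" in no_date_data:
--         for key, count in no_date_data["no_date"].items():
--             result[key] = result.get(key, 0) + count
--     for exclude in excludes:
--         result.pop(exclude, None)
--     return result
-- ===== SOURCE B (Python) =====
-- def calculate_total_results(data, no_date_data, excludes: list[str]):
--     """全日付データ合計"""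
--     sources = list(data.values())
--     if "no_date" in no_date_data:
--         sources.append(no_date_data["no_date"])
--     keys = []
--     seen = set()
--     for src in sources:
--         for k in src:
--             if k not in seen:
--                 seen.add(k)
--                 keys.append(k)
--     ex = set(excludes)
--     return {k: sum(src.get(k, 0) for src in sources) for k in keys if k not in ex}
-- ===== Notes on version B (the rewrite author's own statement) =====
-- stated objective: alternative
-- what changed: A accumulates one running dict in a single forward pass and then pops the excludes; B gathers the source dicts into a list, dedups their keys in encounter order with a seen-set, and builds the result as a per-key sum across all sources with the excludes filtered out up front.
import Mathlib
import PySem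

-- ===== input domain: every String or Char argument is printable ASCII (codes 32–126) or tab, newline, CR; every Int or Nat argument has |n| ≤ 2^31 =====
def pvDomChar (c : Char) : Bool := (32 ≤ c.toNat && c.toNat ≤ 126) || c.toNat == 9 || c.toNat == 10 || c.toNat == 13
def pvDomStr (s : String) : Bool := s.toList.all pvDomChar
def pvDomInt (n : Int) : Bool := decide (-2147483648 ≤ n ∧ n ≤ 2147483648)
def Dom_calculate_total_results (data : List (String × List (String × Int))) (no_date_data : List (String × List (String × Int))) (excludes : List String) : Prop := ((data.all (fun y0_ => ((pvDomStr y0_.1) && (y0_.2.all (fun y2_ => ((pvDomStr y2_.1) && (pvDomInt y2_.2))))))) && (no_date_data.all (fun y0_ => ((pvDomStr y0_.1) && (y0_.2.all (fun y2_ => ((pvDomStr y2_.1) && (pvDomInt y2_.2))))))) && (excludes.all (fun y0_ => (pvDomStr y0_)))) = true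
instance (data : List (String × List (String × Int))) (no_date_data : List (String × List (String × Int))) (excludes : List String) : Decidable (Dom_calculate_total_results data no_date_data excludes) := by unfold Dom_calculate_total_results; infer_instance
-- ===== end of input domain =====

-- B replaces A's single accumulating dict (sum-as-you-go, then pop excludes) by a key-gathering
-- decomposition: collect the source dicts, dedup their keys in encounter order, and build the result
-- per key as a sum across all sources, filtering excludes up front (objective: alternative, same cost).


-- ===== PORT A =====
-- "if 'no_date' in no_date_data: … no_date_data['no_date'] …" is ported as a match on get?
-- (exact: membership in a dict's keys holds iff get? returns some).
def calculate_total_results (data : List (String × List (String × Int))) (no_date_data : List (String × List (String × Int))) (excludes : List String) : List (String × Int) :=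
  let r1 : PySem.Dict String Int :=
    data.foldl (fun r kv => kv.2.foldl (fun r p => r.insert p.1 (r.getD p.1 0 + p.2)) r) PySem.Dict.empty
  let r2 : PySem.Dict String Int :=
    match (PySem.Dict.mk no_date_data).get? "no_date" with
    | some vs => vs.foldl (fun r p => r.insert p.1 (r.getD p.1 0 + p.2)) r1
    | none => r1
  (excludes.foldl (fun r e => r.erase e) r2).items

-- ===== PORT B =====
-- Source B's `keys`/`seen` pair (list of first occurrences + membership set) IS PySem.Set built by add.
def calculate_total_results_alt (data : List (String × List (String × Int))) (no_date_data : List (String × List (String × Int))) (excludes : List String) : List (String × Int) :=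
  let sources : List (List (String × Int)) :=
    data.map Prod.snd ++
      (match (PySem.Dict.mk no_date_data).get? "no_date" with
       | some vs => [vs]
       | none => [])
  let keys : PySem.Set String :=
    sources.foldl (fun s src => src.foldl (fun s p => PySem.Set.add s p.1) s) PySem.Set.empty
  let ex : PySem.Set String := PySem.Set.ofList excludes
  (keys.filter (fun k => !(PySem.Set.contains ex k))).map
    (fun k => (k, sources.foldl (fun t src => t + (PySem.Dict.mk src).getD k 0) 0))

-- ===== PRECONDITION & SPEC =====
-- Pre_ excludes association lists with duplicate keys (at the outer or inner level): those do not
-- represent Python dict arguments at all — both parameters are dicts in Python, whose keys are unique.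
def Pre_calculate_total_results (data : List (String × List (String × Int))) (no_date_data : List (String × List (String × Int))) (excludes : List String) : Prop :=
  (data.map Prod.fst).Nodup ∧ (∀ p ∈ data, (p.2.map Prod.fst).Nodup) ∧
  (no_date_data.map Prod.fst).Nodup ∧ (∀ p ∈ no_date_data, (p.2.map Prod.fst).Nodup)
instance (data : List (String × List (String × Int))) (no_date_data : List (String × List (String × Int))) (excludes : List String) : Decidable (Pre_calculate_total_results data no_date_data excludes) := by unfold Pre_calculate_total_results; infer_instance

def pvWitness_calculate_total_results : (List (String × List (String × Int))) × (List (String × List (String × Int))) × List String :=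
  ([("2024-01-01", [("t1", 2), ("t2", 1)]), ("2024-01-02", [("t1", 3)])],
   [("no_date", [("t2", 5)])], ["t2"])

def Spec_calculate_total_results (data : List (String × List (String × Int))) (no_date_data : List (String × List (String × Int))) (excludes : List String) (out : List (String × Int)) : Prop := out = calculate_total_results_alt data no_date_data excludes
instance (data : List (String × List (String × Int))) (no_date_data : List (String × List (String × Int))) (excludes : List String) (out : List (String × Int)) : Decidable (Spec_calculate_total_results data no_date_data excludes out) := by unfold Spec_calculate_total_results; infer_instance

-- ===== CLAIM (what is proved, stated in full; the proofs are below) =====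
def Claim_equal_calculate_total_results : Prop := ∀ (data : List (String × List (String × Int))) (no_date_data : List (String × List (String × Int))) (excludes : List String), Dom_calculate_total_results data no_date_data excludes → Pre_calculate_total_results data no_date_data excludes → Spec_calculate_total_results data no_date_data excludes (calculate_total_results data no_date_data excludes)

-- ===== LEMMAS AND PROOFS =====

-- total of the values attached to key k in a flat item list
def pvSumKey (items : List (String × Int)) (k : String) : Int :=
  ((items.filter (fun p => p.1 == k)).map Prod.snd).sum

theorem pvSumKey_cons (p : String × Int) (ps : List (String × Int)) (k : String) :
    pvSumKey (p :: ps) k = (if p.1 = k then p.2 else 0) + pvSumKey ps k := by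
  simp only [pvSumKey, List.filter_cons]
  split_ifs with h h' h' <;> simp_all

theorem pvSumKey_append (xs ys : List (String × Int)) (k : String) :
    pvSumKey (xs ++ ys) k = pvSumKey xs k + pvSumKey ys k := by
  simp [pvSumKey, List.filter_append]

theorem pvSumKey_of_not_mem (items : List (String × Int)) (k : String)
    (h : k ∉ items.map Prod.fst) : pvSumKey items k = 0 := by
  have hf : items.filter (fun p => p.1 == k) = [] := by
    rw [List.filter_eq_nil_iff]
    intro p hp
    simp only [beq_iff_eq]
    intro hpk
    exact h (hpk ▸ List.mem_map_of_mem hp)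
  simp [pvSumKey, hf]

theorem pvSumKey_flatten (srcs : List (List (String × Int))) (k : String) :
    pvSumKey srcs.flatten k = (srcs.map (fun s => pvSumKey s k)).sum := by
  induction srcs with
  | nil => simp [pvSumKey]
  | cons s rest ih => simp [List.flatten_cons, pvSumKey_append, ih]

-- A's accumulation: getD after the insert loop is the running total
theorem pvGetD_foldl_step (l : List (String × Int)) (d : PySem.Dict String Int) (k : String) :
    (l.foldl (fun r p => r.insert p.1 (r.getD p.1 0 + p.2)) d).getD k 0
      = d.getD k 0 + pvSumKey l k := by
  induction l generalizing d with
  | nil => simp [pvSumKey]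
  | cons p ps ih =>
      rw [List.foldl_cons, ih, pvSumKey_cons, PySem.Dict.getD_insert]
      rcases eq_or_ne p.1 k with h | h
      · subst h; simp; ring
      · rw [if_neg (fun hc => h hc.symm), if_neg h]; ring

-- a dict with nodup keys looked up with default 0 is the key total of its item list
theorem pvGetD_mk_eq_sumKey (src : List (String × Int)) (k : String)
    (h : (src.map Prod.fst).Nodup) :
    (PySem.Dict.mk src).getD k 0 = pvSumKey src k := by
  induction src with
  | nil => simp [PySem.Dict.getD, PySem.Dict.get?, pvSumKey]
  | cons p ps ih =>
      rw [List.map_cons] at h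
      have h' := List.nodup_cons.mp h
      rw [pvSumKey_cons, PySem.Dict.getD, PySem.Dict.get?_mk_cons]
      by_cases hk : p.1 = k
      · subst hk
        rw [pvSumKey_of_not_mem ps p.1 h'.1]
        simp
      · have := ih h'.2
        rw [PySem.Dict.getD] at this
        simp [hk, this]

-- the erase loop is one filter over the item list
theorem pvErase_foldl (excl : List String) (d : PySem.Dict String Int) :
    (excl.foldl (fun r e => r.erase e) d).items
      = d.items.filter (fun p => !(excl.contains p.1)) := by
  induction excl generalizing d with
  | nil => simp
  | cons e es ih =>
      rw [List.foldl_cons, ih]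
      simp only [PySem.Dict.erase, List.filter_filter]
      apply List.filter_congr
      intro p _
      by_cases h1 : p.1 = e <;> by_cases h2 : p.1 ∈ es <;> simp [h1, h2]

-- B's seen/keys loop collects the distinct keys of all sources, in encounter order
theorem pvKeys_foldl (srcs : List (List (String × Int))) (s : PySem.Set String) :
    srcs.foldl (fun s src => src.foldl (fun s p => PySem.Set.add s p.1) s) s
      = PySem.Set.update s (srcs.flatten.map Prod.fst) := by
  induction srcs generalizing s with
  | nil => simp [PySem.Set.update_nil]
  | cons src rest ih =>
      rw [List.foldl_cons, ← PySem.Set.update_map_eq_foldl_add src Prod.fst s, ih,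
        List.flatten_cons, List.map_append, PySem.Set.update_append]

-- B's per-key sum across sources equals the flat key total, given unique keys per source
theorem pvSources_sum (srcs : List (List (String × Int))) (k : String)
    (h : ∀ src ∈ srcs, (src.map Prod.fst).Nodup) :
    srcs.foldl (fun t src => t + (PySem.Dict.mk src).getD k 0) 0
      = pvSumKey srcs.flatten k := by
  rw [PySem.List.foldl_add, pvSumKey_flatten, zero_add]
  exact congrArg List.sum
    (List.map_congr_left (fun src hs => pvGetD_mk_eq_sumKey src k (h src hs)))

-- the two pipelines agree once the sources list is fixed
theorem pvCore (srcs : List (List (String × Int))) (excl : List String)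
    (h : ∀ src ∈ srcs, (src.map Prod.fst).Nodup) :
    (excl.foldl (fun r e => r.erase e)
        (srcs.flatten.foldl (fun r p => r.insert p.1 (r.getD p.1 0 + p.2)) PySem.Dict.empty)).items
      = ((srcs.foldl (fun s src => src.foldl (fun s p => PySem.Set.add s p.1) s) PySem.Set.empty).filter
          (fun k => !(PySem.Set.contains (PySem.Set.ofList excl) k))).map
          (fun k => (k, srcs.foldl (fun t src => t + (PySem.Dict.mk src).getD k 0) 0)) := by
  set D := srcs.flatten.foldl (fun r p => r.insert p.1 (r.getD p.1 0 + p.2)) PySem.Dict.empty with hD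
  have hkeys : D.keys = PySem.Set.ofList (srcs.flatten.map Prod.fst) := by
    rw [hD, PySem.Dict.keys_foldl_insert_key srcs.flatten Prod.fst
      (fun d p => d.getD p.1 0 + p.2) PySem.Dict.empty]
    simp [PySem.Set.update_nil_left]
  have hnd : D.keys.Nodup := by
    rw [hkeys]; exact PySem.Set.nodup_ofList _
  rw [pvErase_foldl, PySem.Dict.items_eq_map_keys D hnd 0, List.filter_map, hkeys,
    pvKeys_foldl, PySem.Set.update_empty]
  have hpred : ((fun p : String × Int => !(excl.contains p.1)) ∘ (fun k => (k, D.getD k 0)))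
      = fun k => !(PySem.Set.contains (PySem.Set.ofList excl) k) := by
    funext k
    simp [Function.comp, PySem.Set.contains, PySem.Set.mem_ofList]
  rw [hpred]
  apply List.map_congr_left
  intro k _
  rw [hD, pvGetD_foldl_step, PySem.Dict.getD_empty, zero_add, pvSources_sum srcs k h]

-- ===== VERDICT (by name: the statement is the Claim_ definition above) =====
theorem calculate_total_results_spec : Claim_equal_calculate_total_results := by
  intro data ndd excl _ hpre
  obtain ⟨_, hd2, _, hn2⟩ := hpre
  unfold Spec_calculate_total_results calculate_total_results calculate_total_results_alt
  have hA : data.foldl (fun r kv => kv.2.foldl (fun r p => r.insert p.1 (r.getD p.1 0 + p.2)) r) PySem.Dict.empty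
      = ((data.map Prod.snd).flatten).foldl (fun r p => r.insert p.1 (r.getD p.1 0 + p.2)) PySem.Dict.empty := by
    rw [List.foldl_flatten, List.foldl_map]
  cases hnd : (PySem.Dict.mk ndd).get? "no_date" with
  | none =>
      have hall : ∀ src ∈ data.map Prod.snd, (src.map Prod.fst).Nodup := by
        intro src hs; obtain ⟨p, hp, rfl⟩ := List.mem_map.mp hs; exact hd2 p hp
      dsimp only
      rw [List.append_nil, hA, pvCore (data.map Prod.snd) excl hall]
  | some vs =>
      have hvs : (vs.map Prod.fst).Nodup := by
        simp only [PySem.Dict.get?] at hnd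
        obtain ⟨q, hq1, hq2⟩ := Option.map_eq_some_iff.mp hnd
        exact hq2 ▸ hn2 q (List.mem_of_find?_eq_some hq1)
      have hall : ∀ src ∈ data.map Prod.snd ++ [vs], (src.map Prod.fst).Nodup := by
        intro src hs
        rcases List.mem_append.mp hs with hs | hs
        · obtain ⟨p, hp, rfl⟩ := List.mem_map.mp hs; exact hd2 p hp
        · simp at hs; subst hs; exact hvs
      dsimp only
      rw [hA, ← List.foldl_append,
        show (List.map Prod.snd data).flatten ++ vs = (List.map Prod.snd data ++ [vs]).flatten by simp,
        pvCore (data.map Prod.snd ++ [vs]) excl hall]
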